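-- pv_equiv track=rewrite | github.com/linmou/LLM_EmoBehav_game_theory | emotion_memory_experiments/tests/test_integration_with_mocks.py | generate
-- ===== SOURCE A (Python) =====
-- from typing import Dict, List, Any
--
-- def generate(prompts: List[str], **generation_kwargs) -> List[str]:
--     """Generate mock responses based on task type"""
--     responses = []
--     for prompt in prompts:
--         if "passkey" in prompt.lower() or "key" in prompt.lower():
--             responses.append("The passkey is 12345")
--         elif "machine learning" in prompt.lower() or "ai" in prompt.lower():
--             responses.append("Machine learning is a subset of artificial intelligence")
--         elif "alice" in prompt.lower() or "budget" in prompt.lower():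
--             responses.append("Alice's budget is $30,000")
--         elif "tesla" in prompt.lower():
--             responses.append("Tesla Model 3 and Chevy Bolt")
--         elif "charging" in prompt.lower():
--             responses.append("charging infrastructure")
--         else:
--             responses.append("Mock response for testing")
--     return responses
-- ===== SOURCE B (Python) =====
-- _RULES = [
--     (["passkey", "key"], "The passkey is 12345"),
--     (["machine learning", "ai"], "Machine learning is a subset of artificial intelligence"),
--     (["alice", "budget"], "Alice's budget is $30,000"),
--     (["tesla"], "Tesla Model 3 and Chevy Bolt"),
--     (["charging"], "charging infrastructure"),
-- ]
-- _DEFAULT = "Mock response for testing"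
--
-- def generate(prompts, **generation_kwargs):
--     # Staged passes: start from all defaults, then sweep the whole list once per
--     # rule in REVERSE priority order, overwriting matched entries; the highest
--     # priority rule writes last, so it wins — same result as a first-match chain.
--     lowered = [p.lower() for p in prompts]
--     out = [_DEFAULT] * len(prompts)
--     for subs, resp in reversed(_RULES):
--         out = [resp if any(s in pl for s in subs) else cur
--                for pl, cur in zip(lowered, out)]
--     return out
-- ===== Notes on version B (the rewrite author's own statement) =====
-- stated objective: alternative
-- what changed: Inverts the loop nesting: instead of a per-prompt first-match if/elif cascade, B fills the output with defaults and makes one whole-list overwrite pass per rule in reverse priority order (the highest-priority rule writes last, so last-write-wins reproduces first-match).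
import Mathlib
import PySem

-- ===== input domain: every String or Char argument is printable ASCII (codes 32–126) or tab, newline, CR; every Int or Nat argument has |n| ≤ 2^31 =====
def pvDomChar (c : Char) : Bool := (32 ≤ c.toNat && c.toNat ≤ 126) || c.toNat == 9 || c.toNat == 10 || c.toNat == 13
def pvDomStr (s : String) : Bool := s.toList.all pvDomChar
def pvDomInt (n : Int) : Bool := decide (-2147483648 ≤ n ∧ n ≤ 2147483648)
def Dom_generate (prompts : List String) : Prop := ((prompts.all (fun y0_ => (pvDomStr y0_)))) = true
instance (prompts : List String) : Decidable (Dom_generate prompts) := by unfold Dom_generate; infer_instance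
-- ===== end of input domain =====

-- B inverts the loop nesting: all-defaults output then one whole-list overwrite pass per rule
-- in reverse priority order (last write wins), instead of a per-prompt if/elif cascade.


-- ===== PORT A =====
def generate (prompts : List String) : List String :=
  prompts.foldl (fun responses prompt =>
    if PySem.Str.isIn "passkey" (PySem.Str.lower prompt) || PySem.Str.isIn "key" (PySem.Str.lower prompt) then
      responses ++ ["The passkey is 12345"]
    else if PySem.Str.isIn "machine learning" (PySem.Str.lower prompt) || PySem.Str.isIn "ai" (PySem.Str.lower prompt) then
      responses ++ ["Machine learning is a subset of artificial intelligence"]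
    else if PySem.Str.isIn "alice" (PySem.Str.lower prompt) || PySem.Str.isIn "budget" (PySem.Str.lower prompt) then
      responses ++ ["Alice's budget is $30,000"]
    else if PySem.Str.isIn "tesla" (PySem.Str.lower prompt) then
      responses ++ ["Tesla Model 3 and Chevy Bolt"]
    else if PySem.Str.isIn "charging" (PySem.Str.lower prompt) then
      responses ++ ["charging infrastructure"]
    else
      responses ++ ["Mock response for testing"]) []

-- ===== PORT B =====
def pvRules : List (List String × String) :=
  [ (["passkey", "key"], "The passkey is 12345"),
    (["machine learning", "ai"], "Machine learning is a subset of artificial intelligence"),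
    (["alice", "budget"], "Alice's budget is $30,000"),
    (["tesla"], "Tesla Model 3 and Chevy Bolt"),
    (["charging"], "charging infrastructure") ]

-- one overwrite pass over the whole (lowered, current-output) list for a single rule
def pvApply (lowered : List String) (out : List String) (rule : List String × String) : List String :=
  (lowered.zip out).map (fun pc => if rule.1.any (fun s => PySem.Str.isIn s pc.1) then rule.2 else pc.2)

def generate_alt (prompts : List String) : List String :=
  let lowered := prompts.map PySem.Str.lower
  let out := List.replicate prompts.length "Mock response for testing"
  pvRules.reverse.foldl (pvApply lowered) out

-- ===== PRECONDITION & SPEC =====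
def Spec_generate (prompts : List String) (out : List String) : Prop := out = generate_alt prompts
instance (prompts : List String) (out : List String) : Decidable (Spec_generate prompts out) := by unfold Spec_generate; infer_instance

-- ===== CLAIM (what is proved, stated in full; the proofs are below) =====
def Claim_equal_generate : Prop := ∀ (prompts : List String), Dom_generate prompts → Spec_generate prompts (generate prompts)

-- ===== LEMMAS AND PROOFS =====
-- the first-match cascade on an (already lowered) string, shared reference point of both proofs
def pvChain (pl : String) : String :=
  if PySem.Str.isIn "passkey" pl || PySem.Str.isIn "key" pl then
    "The passkey is 12345"
  else if PySem.Str.isIn "machine learning" pl || PySem.Str.isIn "ai" pl then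
    "Machine learning is a subset of artificial intelligence"
  else if PySem.Str.isIn "alice" pl || PySem.Str.isIn "budget" pl then
    "Alice's budget is $30,000"
  else if PySem.Str.isIn "tesla" pl then
    "Tesla Model 3 and Chevy Bolt"
  else if PySem.Str.isIn "charging" pl then
    "charging infrastructure"
  else
    "Mock response for testing"

def pvStep (pl : String) (cur : String) (rule : List String × String) : String :=
  if rule.1.any (fun s => PySem.Str.isIn s pl) then rule.2 else cur

-- A's foldl, characterised
theorem generate_foldl (prompts : List String) (acc : List String) :
    prompts.foldl (fun responses prompt =>
      if PySem.Str.isIn "passkey" (PySem.Str.lower prompt) || PySem.Str.isIn "key" (PySem.Str.lower prompt) then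
        responses ++ ["The passkey is 12345"]
      else if PySem.Str.isIn "machine learning" (PySem.Str.lower prompt) || PySem.Str.isIn "ai" (PySem.Str.lower prompt) then
        responses ++ ["Machine learning is a subset of artificial intelligence"]
      else if PySem.Str.isIn "alice" (PySem.Str.lower prompt) || PySem.Str.isIn "budget" (PySem.Str.lower prompt) then
        responses ++ ["Alice's budget is $30,000"]
      else if PySem.Str.isIn "tesla" (PySem.Str.lower prompt) then
        responses ++ ["Tesla Model 3 and Chevy Bolt"]
      else if PySem.Str.isIn "charging" (PySem.Str.lower prompt) then
        responses ++ ["charging infrastructure"]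
      else
        responses ++ ["Mock response for testing"]) acc
    = acc ++ prompts.map (fun p => pvChain (PySem.Str.lower p)) := by
  induction prompts generalizing acc with
  | nil => simp
  | cons p rest ih =>
    simp only [List.foldl_cons, List.map_cons, ih, pvChain]
    split_ifs <;> simp

-- folding the reversed rules over one element equals the cascade (last write = rule 0 wins)
theorem pvStep_fold (pl : String) :
    pvRules.reverse.foldl (pvStep pl) "Mock response for testing" = pvChain pl := by
  simp only [pvRules, pvChain, pvStep, List.reverse, List.reverseAux, List.foldl,
    List.any_cons, List.any_nil, Bool.or_false]

theorem pvApply_cons (pl : String) (ls : List String) (o : String) (os : List String)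
    (rule : List String × String) :
    pvApply (pl :: ls) (o :: os) rule = pvStep pl o rule :: pvApply ls os rule := by
  simp [pvApply, pvStep]

-- the rule-major fold acts pointwise on cons cells
theorem pvFold_cons (rules : List (List String × String)) (pl : String) (ls : List String)
    (o : String) (os : List String) :
    rules.foldl (pvApply (pl :: ls)) (o :: os)
      = rules.foldl (pvStep pl) o :: rules.foldl (pvApply ls) os := by
  induction rules generalizing o os with
  | nil => rfl
  | cons r rs ih => simp only [List.foldl_cons, pvApply_cons, ih]

theorem pvFold_nil (rules : List (List String × String)) :
    rules.foldl (pvApply []) [] = [] := by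
  induction rules with
  | nil => rfl
  | cons r rs ih => simpa [pvApply] using ih

theorem generate_alt_eq_map (prompts : List String) :
    generate_alt prompts = prompts.map (fun p => pvChain (PySem.Str.lower p)) := by
  unfold generate_alt
  induction prompts with
  | nil => simpa using pvFold_nil pvRules.reverse
  | cons p rest ih =>
    simp only [List.map_cons, List.length_cons, List.replicate_succ, pvFold_cons, ih,
      pvStep_fold]

-- ===== VERDICT (by name: the statement is the Claim_ definition above) =====
theorem generate_spec : Claim_equal_generate := by
  intro prompts _
  unfold Spec_generate generate
  rw [generate_alt_eq_map, generate_foldl]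
  simp
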